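-- pv_equiv track=rewrite | github.com/AyushAgnihotri2025/CP-Solutions | GeeksforGeeks/Python3/Easy/Maximum Diamonds/maximum-diamonds.py | maxDiamonds
-- ===== SOURCE A (Python) =====
-- import heapq
--
-- def maxDiamonds(A, N, K):
--     # code here
--     A, res = [-1*i for i in A], 0
--     heapq.heapify(A)
--     for i in range(K):
--         temp = -1*heapq.heappop(A)
--         res+=temp
--         heapq.heappush(A, -1*(temp//2))
--     return res
-- ===== SOURCE B (Python) =====
-- def maxDiamonds(A, N, K):
--     xs = sorted(A, reverse=True)
--     halves = []   # FIFO queue of halved takes; stays non-increasing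
--     i = 0         # next unused element of xs
--     h = 0         # front of halves
--     res = 0
--     for _ in range(K):
--         if i < len(xs) and (h >= len(halves) or xs[i] >= halves[h]):
--             top = xs[i]
--             i += 1
--         else:
--             top = halves[h]
--             h += 1
--         res += top
--         halves.append(top // 2)
--     return res
-- ===== Notes on version B (the rewrite author's own statement) =====
-- stated objective: alternative
-- what changed: Replaces A's negated min-heap (heapify/heappop/heappush per round) by a single descending sort plus a FIFO queue of halved takes: since the taken values and the halves appended are non-increasing, each round only compares the sorted list's front with the queue's front, with no heap operations at all.
import Mathlib
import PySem

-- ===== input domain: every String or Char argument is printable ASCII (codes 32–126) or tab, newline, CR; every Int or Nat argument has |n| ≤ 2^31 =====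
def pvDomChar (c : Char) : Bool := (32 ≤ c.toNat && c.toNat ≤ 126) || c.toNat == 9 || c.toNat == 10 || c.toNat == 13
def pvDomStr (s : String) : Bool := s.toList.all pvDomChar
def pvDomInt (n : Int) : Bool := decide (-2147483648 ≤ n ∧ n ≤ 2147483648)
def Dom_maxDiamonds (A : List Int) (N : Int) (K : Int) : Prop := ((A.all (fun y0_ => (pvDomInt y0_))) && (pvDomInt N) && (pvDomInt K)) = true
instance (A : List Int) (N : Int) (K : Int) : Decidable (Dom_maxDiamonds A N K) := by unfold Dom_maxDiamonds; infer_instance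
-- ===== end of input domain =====

-- B replaces A's negated min-heap by a single descending sort plus a FIFO queue of halved
-- takes (two-queue greedy): each round compares the two fronts instead of querying a heap.

-- ===== PORT A =====
-- A's heapq calls are ported by their value semantics on an Int multiset: heappop returns the
-- minimum element (exact for Int elements, where tied values are identical), heappush adds an
-- element; the heap's internal array layout never reaches A's result.
def pvALoop (fuel : Nat) (heap : List Int) (res : Int) : Int :=
  match fuel with
  | 0 => res
  | n + 1 =>
    match PySem.List.min? heap (fun x => x) with
    | none => res  -- unreachable under Pre_: Python's heappop raises IndexError here
    | some m =>
      let temp := -1 * m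
      pvALoop n (((PySem.List.remove? heap m).getD []) ++ [-1 * PySem.Int.floordiv temp 2]) (res + temp)

def maxDiamonds (A : List Int) (N : Int) (K : Int) : Int :=
  pvALoop K.toNat (A.map (fun i => -1 * i)) 0

-- ===== PORT B =====
-- Source B's index cursors are carried as the suffixes they denote: ys = xs[i:] (the unused part of
-- the sorted list) and q = halves[h:] (the live part of the FIFO queue); 'i < len(xs)' is ys ≠ [],
-- 'h >= len(halves)' is q = [], 'xs[i] >= halves[h]' is f ≤ x, and halves.append is q ++ [·].
def pvBLoop (fuel : Nat) (ys q : List Int) (res : Int) : Int :=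
  match fuel with
  | 0 => res
  | n + 1 =>
    match ys, q with
    | x :: ys', [] => pvBLoop n ys' [PySem.Int.floordiv x 2] (res + x)
    | x :: ys', f :: q' =>
      if f ≤ x then pvBLoop n ys' ((f :: q') ++ [PySem.Int.floordiv x 2]) (res + x)
      else pvBLoop n (x :: ys') (q' ++ [PySem.Int.floordiv f 2]) (res + f)
    | [], f :: q' => pvBLoop n [] (q' ++ [PySem.Int.floordiv f 2]) (res + f)
    | [], [] => res  -- unreachable under Pre_: Python's halves[h] raises IndexError here

def maxDiamonds_alt (A : List Int) (N : Int) (K : Int) : Int :=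
  pvBLoop K.toNat (PySem.List.sorted A (fun y => y) true) [] 0

-- ===== PRECONDITION & SPEC =====
-- Excludes exactly the raising inputs: with an empty pile list and K ≥ 1 Python A's heappop
-- raises IndexError (and B's halves[h] raises IndexError).
def Pre_maxDiamonds (A : List Int) (N : Int) (K : Int) : Prop := K ≤ 0 ∨ A ≠ []
instance (A : List Int) (N : Int) (K : Int) : Decidable (Pre_maxDiamonds A N K) := by unfold Pre_maxDiamonds; infer_instance
def pvWitness_maxDiamonds : List Int × Int × Int := ([4, 7, 2], 3, 3)

def Spec_maxDiamonds (A : List Int) (N : Int) (K : Int) (out : Int) : Prop := out = maxDiamonds_alt A N K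
instance (A : List Int) (N : Int) (K : Int) (out : Int) : Decidable (Spec_maxDiamonds A N K out) := by unfold Spec_maxDiamonds; infer_instance

-- ===== CLAIM (what is proved, stated in full; the proofs are below) =====
def Claim_equal_maxDiamonds : Prop := ∀ (A : List Int) (N : Int) (K : Int), Dom_maxDiamonds A N K → Pre_maxDiamonds A N K → Spec_maxDiamonds A N K (maxDiamonds A N K)

-- ===== LEMMAS AND PROOFS =====

theorem pv_half (t : Int) :
    2 * PySem.Int.floordiv t 2 ≤ t ∧ t ≤ 2 * PySem.Int.floordiv t 2 + 1 := by
  rw [PySem.Int.floordiv_eq_ediv_of_pos (by norm_num)]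
  omega

-- One step of A's loop, when the heap's minimum is the negation of the greedy maximum 'top'.
theorem pvALoop_step (n : Nat) (heap : List Int) (res top : Int)
    (hmem : -1 * top ∈ heap) (hmax : ∀ y ∈ heap, -1 * top ≤ y) :
    pvALoop (n + 1) heap res
      = pvALoop n (heap.erase (-1 * top) ++ [-1 * PySem.Int.floordiv top 2]) (res + top) := by
  have hne : heap ≠ [] := by intro h; subst h; simp at hmem
  obtain ⟨m, hm⟩ : ∃ m, PySem.List.min? heap (fun y => y) = some m := by
    cases h : PySem.List.min? heap (fun y => y) with
    | none => exact absurd h (by simpa [PySem.List.min?_eq_none_iff] using hne)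
    | some m => exact ⟨m, rfl⟩
  have hmmem : m ∈ heap := PySem.List.min?_mem hm
  have hmeq : m = -1 * top :=
    le_antisymm (PySem.List.min?_isMin hm _ hmem) (hmax m hmmem)
  subst hmeq
  have hrm : PySem.List.remove? heap (-1 * top) = some (heap.erase (-1 * top)) :=
    PySem.List.remove?_eq_some_erase heap _ hmmem
  have hneg : -1 * (-1 * top) = top := by ring
  simp only [pvALoop, hm, hrm, Option.getD_some, hneg]

-- Removing one occurrence of t from heap, given heap ~ t :: l₀ up to permutation.
theorem pv_erase_perm {heap l₀ : List Int} {t : Int}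
    (hp : heap.Perm (t :: l₀)) : (heap.erase t).Perm l₀ := by
  have hmem : t ∈ heap := hp.mem_iff.mpr (List.mem_cons_self)
  exact ((List.perm_cons_erase hmem).symm.trans hp).cons_inv

-- Main invariant: A's heap is (negated) the multiset ys ++ q; ys and q are sorted descending;
-- every queue element e bounds every pending element y by y ≤ 2e+1 (with the q-internal bound
-- only required once the queue has at least two elements).
theorem pv_loop_eq (n : Nat) (heap ys q : List Int) (res : Int)
    (hp : heap.Perm ((ys ++ q).map (fun i => -1 * i)))
    (hys : ys.Pairwise (fun a b => b ≤ a))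
    (hq : q.Pairwise (fun a b => b ≤ a))
    (hQ2 : ∀ e ∈ q, ∀ y ∈ ys, y ≤ 2 * e + 1)
    (hQ3 : 2 ≤ q.length → ∀ e ∈ q, ∀ y ∈ q, y ≤ 2 * e + 1) :
    pvALoop n heap res = pvBLoop n ys q res := by
  induction n generalizing heap ys q res with
  | zero => rfl
  | succ n ih =>
    cases hys_eq : ys with
    | nil =>
      subst hys_eq
      cases hq_eq : q with
      | nil =>
        subst hq_eq
        have hh : heap = [] := by
          have := hp.length_eq
          simpa using List.length_eq_zero_iff.mp (by simpa using this)
        simp [pvALoop, pvBLoop, hh, PySem.List.min?]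
      | cons f q' =>
        subst hq_eq
        rw [List.pairwise_cons] at hq
        obtain ⟨hf, hq'⟩ := hq
        -- take f (queue front); it is the maximum
        have hmax : ∀ y ∈ ([] : List Int) ++ f :: q', y ≤ f := by
          intro y hy
          rcases List.mem_cons.mp (by simpa using hy) with rfl | hy
          · omega
          · exact hf y hy
        have hmemH : -1 * f ∈ heap :=
          hp.mem_iff.mpr (List.mem_map_of_mem (by simp))
        have hmaxH : ∀ y ∈ heap, -1 * f ≤ y := by
          intro y hy
          obtain ⟨z, hz, rfl⟩ := List.mem_map.mp (hp.mem_iff.mp hy)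
          have := hmax z hz; omega
        rw [pvALoop_step n heap res f hmemH hmaxH]
        simp only [pvBLoop]
        have he : (heap.erase (-1 * f)).Perm (q'.map (fun i => -1 * i)) :=
          pv_erase_perm (hp.trans (by simp))
        apply ih
        · -- multiset
          simpa using he.append (List.Perm.refl [-1 * PySem.Int.floordiv f 2])
        · exact List.Pairwise.nil
        · -- q' ++ [f//2] sorted descending
          rw [List.pairwise_append]
          refine ⟨hq', by simp, ?_⟩
          intro a ha b hb
          have hne' : q' ≠ [] := List.ne_nil_of_mem ha
          have hfa : f ≤ 2 * a + 1 := hQ3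
            (by cases q' with | nil => exact absurd rfl hne' | cons _ _ => simp)
            a (by simp [ha]) f (by simp)
          have := pv_half f
          simp only [List.mem_singleton] at hb
          omega
        · intro e _ y hy; simp at hy
        · -- internal bound for q' ++ [f//2]
          intro hlen e he' y hy'
          cases hq'' : q' with
          | nil => subst hq''; simp at hlen
          | cons g q'' =>
            subst hq''
            have hold : ∀ e ∈ f :: g :: q'', ∀ y ∈ f :: g :: q'', y ≤ 2 * e + 1 :=
              hQ3 (by simp)
            have hfge : -1 ≤ f := by have := hold f (by simp) f (by simp); omega
            have hhf := pv_half f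
            rcases List.mem_append.mp he' with he1 | he1
            · rcases List.mem_append.mp hy' with hy1 | hy1
              · exact hold e (by simp [he1]) y (by simp [hy1])
              · -- y = f//2
                simp only [List.mem_singleton] at hy1
                have : f ≤ 2 * e + 1 := hold e (by simp [he1]) f (by simp)
                omega
            · -- e = f//2
              simp only [List.mem_singleton] at he1
              rcases List.mem_append.mp hy' with hy1 | hy1
              · have : y ≤ f := hf y (by simp [hy1])
                omega
              · simp only [List.mem_singleton] at hy1
                omega
    | cons x ys' =>
      subst hys_eq
      rw [List.pairwise_cons] at hys
      obtain ⟨hx, hys'⟩ := hys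
      cases hq_eq : q with
      | nil =>
        subst hq_eq
        -- take x (queue empty)
        have hmax : ∀ y ∈ (x :: ys') ++ ([] : List Int), y ≤ x := by
          intro y hy
          rcases List.mem_cons.mp (by simpa using hy) with rfl | hy
          · omega
          · exact hx y hy
        have hmemH : -1 * x ∈ heap :=
          hp.mem_iff.mpr (List.mem_map_of_mem (by simp))
        have hmaxH : ∀ y ∈ heap, -1 * x ≤ y := by
          intro y hy
          obtain ⟨z, hz, rfl⟩ := List.mem_map.mp (hp.mem_iff.mp hy)
          have := hmax z hz; omega
        rw [pvALoop_step n heap res x hmemH hmaxH]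
        simp only [pvBLoop]
        have he : (heap.erase (-1 * x)).Perm (ys'.map (fun i => -1 * i)) :=
          pv_erase_perm (hp.trans (by simp))
        apply ih
        · simpa using he.append (List.Perm.refl [-1 * PySem.Int.floordiv x 2])
        · exact hys'
        · simp
        · -- Q2 for singleton queue [x//2]
          intro e he' y hy
          simp only [List.mem_singleton] at he'
          have := hx y hy
          have := pv_half x
          omega
        · intro hlen; simp at hlen
      | cons f q' =>
        subst hq_eq
        rw [List.pairwise_cons] at hq
        obtain ⟨hf, hq'⟩ := hq
        have hxf : x ≤ 2 * f + 1 := hQ2 f (by simp) x (by simp)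
        by_cases hfx : f ≤ x
        · -- take x
          have hfm1 : -1 ≤ f := by omega
          have hmax : ∀ y ∈ (x :: ys') ++ f :: q', y ≤ x := by
            intro y hy
            rcases List.mem_append.mp hy with hy1 | hy1
            · rcases List.mem_cons.mp hy1 with rfl | hy1
              · omega
              · exact hx y hy1
            · rcases List.mem_cons.mp hy1 with rfl | hy1
              · exact hfx
              · have := hf y hy1; omega
          have hmemH : -1 * x ∈ heap :=
            hp.mem_iff.mpr (List.mem_map_of_mem (by simp))
          have hmaxH : ∀ y ∈ heap, -1 * x ≤ y := by
            intro y hy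
            obtain ⟨z, hz, rfl⟩ := List.mem_map.mp (hp.mem_iff.mp hy)
            have := hmax z hz; omega
          rw [pvALoop_step n heap res x hmemH hmaxH]
          simp only [pvBLoop, if_pos hfx]
          have he : (heap.erase (-1 * x)).Perm ((ys' ++ f :: q').map (fun i => -1 * i)) :=
            pv_erase_perm (hp.trans (by simp))
          -- the whole-queue internal bound already holds for f :: q' here
          have hself : ∀ e ∈ f :: q', ∀ y ∈ f :: q', y ≤ 2 * e + 1 := by
            cases hq'' : q' with
            | nil =>
              subst hq''
              intro e he' y hy'
              simp only [List.mem_singleton] at he' hy'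
              subst he'; subst hy'
              omega
            | cons g q'' => subst hq''; exact hQ3 (by simp)
          have hhx := pv_half x
          apply ih
          · simpa using he.append (List.Perm.refl [-1 * PySem.Int.floordiv x 2])
          · exact hys'
          · rw [List.pairwise_append]
            refine ⟨List.pairwise_cons.mpr ⟨hf, hq'⟩, by simp, ?_⟩
            intro a ha b hb
            have hxa : x ≤ 2 * a + 1 := hQ2 a ha x (by simp)
            simp only [List.mem_singleton] at hb
            omega
          · intro e he' y hy
            rcases List.mem_append.mp he' with he1 | he1
            · exact hQ2 e he1 y (by simp [hy])
            · simp only [List.mem_singleton] at he1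
              have := hx y hy
              omega
          · intro _ e he' y hy'
            rcases List.mem_append.mp he' with he1 | he1
            · rcases List.mem_append.mp hy' with hy1 | hy1
              · exact hself e he1 y hy1
              · simp only [List.mem_singleton] at hy1
                have : x ≤ 2 * e + 1 := hQ2 e he1 x (by simp)
                omega
            · simp only [List.mem_singleton] at he1
              rcases List.mem_append.mp hy' with hy1 | hy1
              · have : y ≤ x := hmax y (List.mem_append.mpr (Or.inr hy1))
                omega
              · simp only [List.mem_singleton] at hy1
                omega
        · -- take f (strictly larger than the sorted front x)
          have hxf' : x < f := by omega
          have hmax : ∀ y ∈ (x :: ys') ++ f :: q', y ≤ f := by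
            intro y hy
            rcases List.mem_append.mp hy with hy1 | hy1
            · rcases List.mem_cons.mp hy1 with rfl | hy1
              · omega
              · have := hx y hy1; omega
            · rcases List.mem_cons.mp hy1 with rfl | hy1
              · omega
              · exact hf y hy1
          have hmemH : -1 * f ∈ heap :=
            hp.mem_iff.mpr (List.mem_map_of_mem (by simp))
          have hmaxH : ∀ y ∈ heap, -1 * f ≤ y := by
            intro y hy
            obtain ⟨z, hz, rfl⟩ := List.mem_map.mp (hp.mem_iff.mp hy)
            have := hmax z hz; omega
          rw [pvALoop_step n heap res f hmemH hmaxH]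
          simp only [pvBLoop, if_neg hfx]
          have he : (heap.erase (-1 * f)).Perm (((x :: ys') ++ q').map (fun i => -1 * i)) := by
            refine pv_erase_perm (hp.trans ?_)
            have := List.perm_middle (a := -1 * f)
              (l₁ := (x :: ys').map (fun i => -1 * i)) (l₂ := q'.map (fun i => -1 * i))
            simpa using this
          have hhf := pv_half f
          apply ih
          · simpa using he.append (List.Perm.refl [-1 * PySem.Int.floordiv f 2])
          · exact List.pairwise_cons.mpr ⟨hx, hys'⟩
          · rw [List.pairwise_append]
            refine ⟨hq', by simp, ?_⟩
            intro a ha b hb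
            have hne' : q' ≠ [] := List.ne_nil_of_mem ha
            have hfa : f ≤ 2 * a + 1 := hQ3
              (by cases q' with | nil => exact absurd rfl hne' | cons _ _ => simp)
              a (by simp [ha]) f (by simp)
            simp only [List.mem_singleton] at hb
            omega
          · intro e he' y hy
            rcases List.mem_append.mp he' with he1 | he1
            · exact hQ2 e (by simp [he1]) y hy
            · simp only [List.mem_singleton] at he1
              have hyx : y ≤ x := by
                rcases List.mem_cons.mp hy with rfl | hy1
                · omega
                · exact hx y hy1
              omega
          · intro hlen e he' y hy'
            cases hq'' : q' with
            | nil => subst hq''; simp at hlen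
            | cons g q'' =>
              subst hq''
              have hold : ∀ e ∈ f :: g :: q'', ∀ y ∈ f :: g :: q'', y ≤ 2 * e + 1 :=
                hQ3 (by simp)
              have hfge : -1 ≤ f := by have := hold f (by simp) f (by simp); omega
              rcases List.mem_append.mp he' with he1 | he1
              · rcases List.mem_append.mp hy' with hy1 | hy1
                · exact hold e (by simp [he1]) y (by simp [hy1])
                · simp only [List.mem_singleton] at hy1
                  have : f ≤ 2 * e + 1 := hold e (by simp [he1]) f (by simp)
                  omega
              · simp only [List.mem_singleton] at he1
                rcases List.mem_append.mp hy' with hy1 | hy1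
                · have : y ≤ f := hf y (by simp [hy1])
                  omega
                · simp only [List.mem_singleton] at hy1
                  omega

-- ===== VERDICT (by name: the statement is the Claim_ definition above) =====
theorem maxDiamonds_spec : Claim_equal_maxDiamonds := by
  intro A N K _ _
  show maxDiamonds A N K = maxDiamonds_alt A N K
  refine pv_loop_eq K.toNat (A.map (fun i => -1 * i)) (PySem.List.sorted A (fun y => y) true) [] 0
    ?_ (PySem.List.sorted_pairwise_rev A (fun y => y)) List.Pairwise.nil
    (by intro e he; simp at he) (by intro h; simp at h)
  rw [List.append_nil]
  exact (PySem.List.sorted_perm A (fun y => y) true).symm.map (fun i => -1 * i)
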